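-- pv_equiv track=rewrite | github.com/Dltmd202/BOJ-ProblemSlove | python/1517/main.py | convert
-- ===== SOURCE A (Python) =====
-- def convert(origin):
--     sorted_ = sorted(origin)
--     indexed = dict().fromkeys(sorted_, 0)
--     res = []
--     visited = [False] * (len(origin) + 1)
--     for i, temp in enumerate(indexed):
--         indexed[temp] = i + 1
--     for i in origin:
--         if not visited[indexed[i]]:
--             res.append(indexed[i])
--             visited[indexed[i]] = True
--     return res
-- ===== SOURCE B (Python) =====
-- def convert(origin):
--     distinct = set(origin)
--     seen = set()
--     res = []
--     for v in origin:
--         if v not in seen: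
--             seen.add(v)
--             res.append(1 + sum(u < v for u in distinct))
--     return res
-- ===== Notes on version B (the rewrite author's own statement) =====
-- stated objective: alternative
-- what changed: A sorts, builds an enumerated rank dict and deduplicates through a rank-indexed visited boolean array; B never sorts: in one pass over the input it keeps a seen-set and computes each first occurrence's rank directly as 1 + the count of distinct values smaller than it.
import Mathlib
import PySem

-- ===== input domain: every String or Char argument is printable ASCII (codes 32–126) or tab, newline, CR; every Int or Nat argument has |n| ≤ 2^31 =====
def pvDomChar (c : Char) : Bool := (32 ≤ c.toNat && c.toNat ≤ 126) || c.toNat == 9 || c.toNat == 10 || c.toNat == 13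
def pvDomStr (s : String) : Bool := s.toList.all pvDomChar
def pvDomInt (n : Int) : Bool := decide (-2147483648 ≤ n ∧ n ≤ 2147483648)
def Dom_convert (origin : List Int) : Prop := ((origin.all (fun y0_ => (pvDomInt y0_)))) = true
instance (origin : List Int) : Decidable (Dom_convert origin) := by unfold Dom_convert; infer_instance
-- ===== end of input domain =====

-- B replaces A's sort → enumerated rank dict → visited-array dedup pipeline by a single
-- sort-free pass: each first occurrence's rank is 1 + the count of distinct values below it.

-- ===== PORT A =====
-- sorted_ = sorted(origin); indexed = dict().fromkeys(sorted_, 0); for i, temp in enumerate(indexed): indexed[temp] = i + 1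
def convertDict (origin : List Int) : PySem.Dict Int Int :=
  let sorted_ := PySem.List.sorted origin (fun x => x)
  let indexed0 : PySem.Dict Int Int := sorted_.foldl (fun d k => d.insert k 0) PySem.Dict.empty
  (PySem.List.enumerate indexed0.keys).foldl (fun d p => d.insert p.2 (p.1 + 1)) indexed0

def convert (origin : List Int) : List Int :=
  let indexed := convertDict origin
  let visited : List Bool := List.replicate (origin.length + 1) false
  -- for i in origin: if not visited[indexed[i]]: res.append(indexed[i]); visited[indexed[i]] = True
  -- (indexed[i] is ported as get?/getD 0: KeyError is unreachable, every i ∈ origin is a key)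
  (origin.foldl
    (fun (s : List Int × List Bool) i =>
      if !(PySem.List.pyGetD s.2 ((indexed.get? i).getD 0) false) then
        (s.1 ++ [(indexed.get? i).getD 0], PySem.List.pySetD s.2 ((indexed.get? i).getD 0) true)
      else s)
    ([], visited)).1

-- ===== PORT B =====
-- distinct = set(origin); seen = set(); res = []
-- for v in origin: if v not in seen: seen.add(v); res.append(1 + sum(u < v for u in distinct))
-- (the sum over the set is order-independent, so iterating the distinct list is exact)
def convert_alt (origin : List Int) : List Int :=
  let distinct := PySem.Set.ofList origin
  (origin.foldl
    (fun (s : List Int × List Int) v =>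
      if v ∈ s.1 then s
      else (PySem.Set.add s.1 v, s.2 ++ [1 + ((distinct.countP (fun u => u < v) : Nat) : Int)]))
    (([] : List Int), ([] : List Int))).2

-- ===== PRECONDITION & SPEC =====
def Spec_convert (origin : List Int) (out : List Int) : Prop := out = convert_alt origin
instance (origin : List Int) (out : List Int) : Decidable (Spec_convert origin out) := by unfold Spec_convert; infer_instance

-- ===== CLAIM (what is proved, stated in full; the proofs are below) =====
def Claim_equal_convert : Prop := ∀ (origin : List Int), Dom_convert origin → Spec_convert origin (convert origin)

-- ===== LEMMAS AND PROOFS =====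

-- Set.update appends (a sublist of) the fed list after the existing elements.
lemma set_update_append (xs : List Int) : ∀ (s : List Int),
    ∃ t, PySem.Set.update s xs = s ++ t ∧ t.Sublist xs := by
  induction xs with
  | nil => intro s; exact ⟨[], by simp [PySem.Set.update], List.Sublist.refl _⟩
  | cons x xs ih =>
    intro s
    by_cases h : x ∈ s
    · obtain ⟨t, ht, hs⟩ := ih s
      refine ⟨t, ?_, hs.cons x⟩
      simpa [PySem.Set.update, PySem.Set.add, h] using ht
    · obtain ⟨t, ht, hs⟩ := ih (s ++ [x])
      refine ⟨x :: t, ?_, hs.cons₂ x⟩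
      simp only [PySem.Set.update] at ht ⊢
      simpa [PySem.Set.add, h] using ht

lemma ofList_sublist (xs : List Int) : (PySem.Set.ofList xs).Sublist xs := by
  obtain ⟨t, ht, hs⟩ := set_update_append xs []
  rw [PySem.Set.ofList_eq_foldl]
  have : List.foldl PySem.Set.add [] xs = t := by simpa [PySem.Set.update] using ht
  rw [this]; exact hs

lemma set_update_nil_eq_ofList (l : List Int) :
    PySem.Set.update ([] : List Int) l = PySem.Set.ofList l := by
  rw [PySem.Set.ofList_eq_foldl]; rfl

-- deduplicating after sorting gives the same list as sorting the deduplication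
lemma ofList_sorted_eq (origin : List Int) :
    PySem.Set.ofList (PySem.List.sorted origin (fun x => x)) =
      PySem.List.sorted (PySem.Set.ofList origin) (fun x => x) := by
  refine (PySem.List.sorted_eq_of_perm_of_pairwise_lt _ _ _ ?_ ?_).symm
  · refine (List.perm_ext_iff_of_nodup (PySem.Set.nodup_ofList _) (PySem.Set.nodup_ofList _)).mpr ?_
    intro a
    rw [PySem.Set.mem_ofList, PySem.Set.mem_ofList]
    exact (PySem.List.sorted_perm origin (fun x => x) false).mem_iff
  · have hle : List.Pairwise (fun a b : Int => a ≤ b)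
        (PySem.Set.ofList (PySem.List.sorted origin (fun x => x))) :=
      List.Pairwise.sublist (ofList_sublist _) (PySem.List.sorted_pairwise origin (fun x => x))
    have hne := PySem.Set.nodup_ofList (PySem.List.sorted origin (fun x => x))
    exact (hle.and hne).imp (fun h => lt_of_le_of_ne h.1 h.2)

-- dict lookup after an enumerate-overwrite loop over a duplicate-free key list
lemma fold_insert_enum_get? (S : List Int) (hS : S.Nodup) :
    ∀ (s : Int) (d : PySem.Dict Int Int) (v : Int),
    ((PySem.List.enumerate S s).foldl (fun d p => d.insert p.2 (p.1 + 1)) d).get? v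
      = match List.idxOf? v S with
        | some j => some (s + j + 1)
        | none => d.get? v := by
  induction S with
  | nil => intro s d v; simp [PySem.List.enumerate]
  | cons x S ih =>
    intro s d v
    rw [PySem.List.enumerate_cons, List.foldl_cons]
    rw [ih (List.nodup_cons.mp hS).2 (s + 1) (d.insert x (s + 1)) v]
    rw [List.idxOf?_cons]
    by_cases hv : x = v
    · subst hv
      have hnot : List.idxOf? x S = none := by
        rw [List.idxOf?_eq_none_iff]
        exact (List.nodup_cons.mp hS).1
      simp [hnot]
    · have hbeq : (x == v) = false := by simp [hv]
      simp only [hbeq]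
      cases h : List.idxOf? v S with
      | none => simp [PySem.Dict.get?_insert, Ne.symm hv]
      | some j => simp; ring

-- A's dict returns 1 + (position of v in the sorted distinct list)
lemma dict_get? (origin : List Int) (v : Int) (hv : v ∈ origin) :
    ∃ (j : Nat) (hj : j < (PySem.List.sorted (PySem.Set.ofList origin) (fun x => x)).length),
      (PySem.List.sorted (PySem.Set.ofList origin) (fun x => x))[j] = v ∧
      (convertDict origin).get? v = some ((j : Int) + 1) := by
  have hS : (PySem.List.sorted (PySem.Set.ofList origin) (fun x => x)).Nodup :=
    ((PySem.List.sorted_perm _ _ false).nodup_iff).mpr (PySem.Set.nodup_ofList origin)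
  have hvS : v ∈ PySem.List.sorted (PySem.Set.ofList origin) (fun x => x) :=
    ((PySem.List.sorted_perm _ _ false).mem_iff).mpr ((PySem.Set.mem_ofList origin v).mpr hv)
  obtain ⟨j, hj⟩ := Option.ne_none_iff_exists'.mp
    (fun h => (List.idxOf?_eq_none_iff.mp h) hvS)
  obtain ⟨hjl, hjv, -⟩ := List.idxOf?_eq_some_iff.mp hj
  refine ⟨j, hjl, hjv, ?_⟩
  have hkeys :
      ((PySem.List.sorted origin (fun x => x)).foldl
          (fun d k => d.insert k (0 : Int)) PySem.Dict.empty).keys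
        = PySem.List.sorted (PySem.Set.ofList origin) (fun x => x) := by
    rw [PySem.Dict.keys_foldl_insert _ (fun _ _ => (0 : Int)), PySem.Dict.keys_empty,
      set_update_nil_eq_ofList, ofList_sorted_eq]
  unfold convertDict
  simp only [hkeys]
  rw [fold_insert_enum_get? _ hS 0 _ v, hj]
  norm_num

-- in a strictly increasing list, the index of an element is the count of smaller elements
lemma idx_eq_countP (S : List Int) (hp : List.Pairwise (fun a b : Int => a < b) S)
    (j : Nat) (hj : j < S.length) (v : Int) (hv : S[j] = v) :
    S.countP (fun u => u < v) = j := by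
  subst hv
  have hget := List.pairwise_iff_getElem.mp hp
  rw [show S.countP (fun u => u < S[j])
        = (S.take j ++ S.drop j).countP (fun u => u < S[j]) by rw [List.take_append_drop]]
  rw [List.countP_append]
  have h1 : (S.take j).countP (fun u => u < S[j]) = (S.take j).length := by
    rw [List.countP_eq_length]
    intro a ha
    obtain ⟨i, hi, hia⟩ := List.mem_iff_getElem.mp ha
    rw [List.getElem_take] at hia
    have hij : i < j := by simp [List.length_take] at hi; omega
    simpa [hia] using hget i j (by omega) hj hij
  have h2 : (S.drop j).countP (fun u => u < S[j]) = 0 := by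
    rw [List.countP_eq_zero]
    intro a ha
    obtain ⟨i, hi, hia⟩ := List.mem_iff_getElem.mp ha
    rw [List.getElem_drop] at hia
    rcases Nat.eq_or_lt_of_le (Nat.le_add_right j i) with h | h
    · have : a = S[j] := by rw [← hia]; congr 1; omega
      simp [this]
    · have := hget j (j + i) hj (by simpa using (List.length_drop ..) ▸ hi |> fun hh => by omega) h
      rw [hia] at this
      simp [not_lt.mpr (le_of_lt this)]
  rw [h1, h2, List.length_take]
  omega

-- the visited array as the characteristic vector (over indices 0..n) of the f-images of the seen values
def visVec (f : Int → Int) (n : Nat) (seen : List Int) : List Bool :=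
  (List.range (n + 1)).map (fun j => decide ((Int.ofNat j) ∈ seen.map f))

lemma visVec_length (f : Int → Int) (n : Nat) (seen : List Int) :
    (visVec f n seen).length = n + 1 := by simp [visVec]

lemma visVec_get (f : Int → Int) (n : Nat) (seen : List Int) (k : Nat) (hk : k < n + 1) :
    (visVec f n seen)[k]'(by simp [visVec_length, hk]) = decide ((k : Int) ∈ seen.map f) := by
  unfold visVec
  rw [List.getElem_map, List.getElem_range, Int.ofNat_eq_natCast]

lemma visVec_nil (f : Int → Int) (n : Nat) :
    visVec f n [] = List.replicate (n + 1) false := by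
  simp [visVec]

lemma pyGetD_visVec (f : Int → Int) (n : Nat) (seen : List Int) (i : Int)
    (h0 : 0 ≤ i) (h1 : i < (n : Int) + 1) :
    PySem.List.pyGetD (visVec f n seen) i false = decide (i ∈ seen.map f) := by
  rw [PySem.List.pyGetD_eq_getElem _ _ h0 (by rw [visVec_length]; push_cast; omega)]
  rw [visVec_get f n seen i.toNat (by omega)]
  rw [Int.toNat_of_nonneg h0]

lemma pySetD_visVec (f : Int → Int) (n : Nat) (seen : List Int) (i : Int)
    (h0 : 0 ≤ f i) (h1 : f i < (n : Int) + 1) :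
    PySem.List.pySetD (visVec f n seen) (f i) true = visVec f n (seen ++ [i]) := by
  have hk : (f i).toNat < (visVec f n seen).length := by rw [visVec_length]; omega
  have hcast : f i = (((f i).toNat : Nat) : Int) := by omega
  rw [hcast, PySem.List.pySetD, PySem.List.pySet?_natCast _ _ _ hk, Option.getD_some]
  apply List.ext_getElem
  · simp [visVec_length]
  · intro k hk1 hk2
    rw [visVec_length] at hk2
    rw [List.getElem_set, visVec_get f n (seen ++ [i]) k hk2]
    by_cases h : (f i).toNat = k
    · rw [if_pos h]
      symm
      simp only [List.map_append, List.map_cons, List.map_nil, List.mem_append,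
        List.mem_singleton, decide_eq_true_eq]
      exact Or.inr (by omega)
    · rw [if_neg h, visVec_get f n seen k hk2]
      have hne : (k : Int) ≠ f i := by omega
      simp [hne]

-- A's emit-and-mark loop, characterised: it emits the f-images of the unseen values in first-occurrence order
lemma loopA_eq (f : Int → Int) (n : Nat) :
    ∀ (r : List Int) (seen acc : List Int),
      (∀ v, v ∈ r ∨ v ∈ seen → 0 ≤ f v ∧ f v < (n : Int) + 1) →
      (∀ u v, (u ∈ r ∨ u ∈ seen) → (v ∈ r ∨ v ∈ seen) → f u = f v → u = v) →
      r.foldl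
        (fun (s : List Int × List Bool) i =>
          if !(PySem.List.pyGetD s.2 (f i) false) then
            (s.1 ++ [f i], PySem.List.pySetD s.2 (f i) true)
          else s)
        (acc, visVec f n seen)
      = (acc ++ ((PySem.Set.update seen r).drop seen.length).map f,
         visVec f n (PySem.Set.update seen r)) := by
  intro r
  induction r with
  | nil =>
    intro seen acc _ _
    simp [PySem.Set.update]
  | cons i r ih =>
    intro seen acc hrange hinj
    have hi : 0 ≤ f i ∧ f i < (n : Int) + 1 := hrange i (Or.inl (List.mem_cons_self))
    rw [List.foldl_cons]
    rw [pyGetD_visVec f n seen (f i) hi.1 hi.2]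
    have hupd : PySem.Set.update seen (i :: r) = PySem.Set.update (PySem.Set.add seen i) r := rfl
    by_cases hmem : i ∈ seen
    · have hfm : f i ∈ seen.map f := List.mem_map_of_mem hmem
      rw [decide_eq_true hfm]
      simp only [Bool.not_true, Bool.false_eq_true, if_false]
      have hadd : PySem.Set.add seen i = seen := by simp [PySem.Set.add, hmem]
      rw [hupd, hadd]
      exact ih seen acc (fun v hv => hrange v (by tauto)) (fun u v hu hv => hinj u v (by tauto) (by tauto))
    · have hfm : f i ∉ seen.map f := by
        intro h
        obtain ⟨u, hu, hfu⟩ := List.mem_map.mp h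
        exact hmem (hinj u i (Or.inr hu) (Or.inl List.mem_cons_self) hfu ▸ hu)
      rw [decide_eq_false hfm]
      simp only [Bool.not_false, if_true]
      rw [pySetD_visVec f n seen i hi.1 hi.2]
      have hadd : PySem.Set.add seen i = seen ++ [i] := by simp [PySem.Set.add, hmem]
      rw [hupd, hadd]
      have hlift : ∀ v, v ∈ r ∨ v ∈ seen ++ [i] → v ∈ i :: r ∨ v ∈ seen := by
        intro v hv
        rcases hv with h | h
        · exact Or.inl (List.mem_cons_of_mem _ h)
        · rcases List.mem_append.mp h with h | h
          · exact Or.inr h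
          · simp only [List.mem_singleton] at h
            subst h
            exact Or.inl List.mem_cons_self
      rw [ih (seen ++ [i]) (acc ++ [f i])
        (fun v hv => hrange v (hlift v hv))
        (fun u v hu hv => hinj u v (hlift u hu) (hlift v hv))]
      obtain ⟨t, ht, _⟩ := set_update_append r (seen ++ [i])
      rw [ht]
      have h1 : (seen ++ [i] ++ t).drop (seen ++ [i]).length = t := List.drop_left
      have h2 : (seen ++ [i] ++ t).drop seen.length = [i] ++ t := by
        rw [List.append_assoc]
        exact List.drop_left
      rw [h1, h2]
      simp

-- B's loop, characterised: it emits the g-images of the unseen values in first-occurrence order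
lemma loopB_eq (g : Int → Int) :
    ∀ (r seen acc : List Int),
      r.foldl
        (fun (s : List Int × List Int) v =>
          if v ∈ s.1 then s else (PySem.Set.add s.1 v, s.2 ++ [g v]))
        (seen, acc)
      = (PySem.Set.update seen r,
         acc ++ ((PySem.Set.update seen r).drop seen.length).map g) := by
  intro r
  induction r with
  | nil => intro seen acc; simp [PySem.Set.update]
  | cons v r ih =>
    intro seen acc
    rw [List.foldl_cons]
    have hupd : PySem.Set.update seen (v :: r) = PySem.Set.update (PySem.Set.add seen v) r := rfl
    by_cases hmem : v ∈ seen
    · rw [if_pos hmem, hupd]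
      have hadd : PySem.Set.add seen v = seen := by simp [PySem.Set.add, hmem]
      rw [hadd, ih seen acc]
    · rw [if_neg hmem, hupd]
      have hadd : PySem.Set.add seen v = seen ++ [v] := by simp [PySem.Set.add, hmem]
      rw [hadd, ih (seen ++ [v]) (acc ++ [g v])]
      obtain ⟨t, ht, _⟩ := set_update_append r (seen ++ [v])
      rw [ht]
      have h1 : (seen ++ [v] ++ t).drop (seen ++ [v]).length = t := List.drop_left
      have h2 : (seen ++ [v] ++ t).drop seen.length = [v] ++ t := by
        rw [List.append_assoc]
        exact List.drop_left
      rw [h1, h2]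
      simp

-- ===== VERDICT (by name: the statement is the Claim_ definition above) =====
theorem convert_spec : Claim_equal_convert := by
  intro origin _
  show convert origin = convert_alt origin
  have hlenS : (PySem.List.sorted (PySem.Set.ofList origin) (fun x => x)).length ≤ origin.length :=
    le_trans (le_of_eq (PySem.List.sorted_perm _ _ false).length_eq) (ofList_sublist origin).length_le
  have hperm : (PySem.List.sorted (PySem.Set.ofList origin) (fun x => x)).Perm (PySem.Set.ofList origin) :=
    PySem.List.sorted_perm _ _ false
  have hpair : List.Pairwise (fun a b : Int => a < b)
      (PySem.List.sorted (PySem.Set.ofList origin) (fun x => x)) := by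
    have hle := PySem.List.sorted_pairwise (PySem.Set.ofList origin) (fun x => x)
    have hne : (PySem.List.sorted (PySem.Set.ofList origin) (fun x => x)).Nodup :=
      (hperm.nodup_iff).mpr (PySem.Set.nodup_ofList origin)
    exact (hle.and hne).imp (fun h => lt_of_le_of_ne h.1 h.2)
  have hval : ∀ v ∈ origin, ∃ (j : Nat),
      (j : Int) < (origin.length : Int) ∧
      (∃ (hj : j < (PySem.List.sorted (PySem.Set.ofList origin) (fun x => x)).length),
        (PySem.List.sorted (PySem.Set.ofList origin) (fun x => x))[j] = v) ∧
      ((convertDict origin).get? v).getD 0 = (j : Int) + 1 ∧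
      1 + (((PySem.Set.ofList origin).countP (fun u => u < v) : Nat) : Int) = (j : Int) + 1 := by
    intro v hv
    obtain ⟨j, hj, hjv, hA⟩ := dict_get? origin v hv
    refine ⟨j, by exact_mod_cast lt_of_lt_of_le hj hlenS, ⟨hj, hjv⟩, by rw [hA]; rfl, ?_⟩
    have hcnt : (PySem.Set.ofList origin).countP (fun u => u < v) = j := by
      rw [← hperm.countP_eq]
      exact idx_eq_countP _ hpair j hj v hjv
    rw [hcnt]; ring
  have hrange : ∀ v, v ∈ origin ∨ v ∈ ([] : List Int) →
      0 ≤ ((convertDict origin).get? v).getD 0 ∧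
      ((convertDict origin).get? v).getD 0 < (origin.length : Int) + 1 := by
    intro v hv
    obtain ⟨j, hjn, -, hfv, -⟩ := hval v (by tauto)
    rw [hfv]
    constructor <;> omega
  have hinj : ∀ u v, (u ∈ origin ∨ u ∈ ([] : List Int)) → (v ∈ origin ∨ v ∈ ([] : List Int)) →
      ((convertDict origin).get? u).getD 0 = ((convertDict origin).get? v).getD 0 → u = v := by
    intro u v hu hv huv
    obtain ⟨j, -, ⟨hj, hjv⟩, hfu, -⟩ := hval u (by tauto)
    obtain ⟨k, -, ⟨hk, hkv⟩, hfv, -⟩ := hval v (by tauto)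
    rw [hfu, hfv] at huv
    have : j = k := by omega
    subst this
    rw [← hjv, ← hkv]
  have hloopA := loopA_eq (fun v => ((convertDict origin).get? v).getD 0) origin.length
    origin [] [] hrange hinj
  rw [visVec_nil] at hloopA
  beta_reduce at hloopA
  simp only [convert]
  rw [hloopA]
  have hloopB := loopB_eq
    (fun v => 1 + (((PySem.Set.ofList origin).countP (fun u => u < v) : Nat) : Int)) origin [] []
  simp only [convert_alt]
  rw [hloopB]
  rw [set_update_nil_eq_ofList]
  simp only [List.length_nil, List.drop_zero, List.nil_append]
  refine List.map_congr_left ?_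
  intro v hv
  have hvo : v ∈ origin := (PySem.Set.mem_ofList origin v).mp hv
  obtain ⟨j, -, -, hfv, hbv⟩ := hval v hvo
  rw [hfv, hbv]
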